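-- pv_equiv track=rewrite | github.com/pixuenan/TE-mining | script/nonref_insertion_finder.py | check_loci
-- ===== SOURCE A (Python) =====
-- def check_loci(start,end,lst,distan):
--     """check if the location satify the criteria"""
--     flag = False
--     if lst:
--         min_start_distan = min([abs(start-loci[0]) for loci in lst])
--         min_end_distan = min([abs(end-loci[1]) for loci in lst])
--         if min_start_distan<=distan or min_end_distan<=distan:
--             flag = True
--     return flag
-- ===== SOURCE B (Python) =====
-- def check_loci(start, end, lst, distan):
--     """check if the location satify the criteria"""
--     found = False
--     for loci in lst:
--         a = loci[0]
--         b = loci[1]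
--         if abs(start - a) <= distan or abs(end - b) <= distan:
--             found = True
--     return found
-- ===== Notes on version B (the rewrite author's own statement) =====
-- stated objective: simpler
-- what changed: Replaces the two separate min-over-comprehension reductions and threshold tests with one single pass over lst maintaining a found flag with the combined per-element predicate.
import Mathlib
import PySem

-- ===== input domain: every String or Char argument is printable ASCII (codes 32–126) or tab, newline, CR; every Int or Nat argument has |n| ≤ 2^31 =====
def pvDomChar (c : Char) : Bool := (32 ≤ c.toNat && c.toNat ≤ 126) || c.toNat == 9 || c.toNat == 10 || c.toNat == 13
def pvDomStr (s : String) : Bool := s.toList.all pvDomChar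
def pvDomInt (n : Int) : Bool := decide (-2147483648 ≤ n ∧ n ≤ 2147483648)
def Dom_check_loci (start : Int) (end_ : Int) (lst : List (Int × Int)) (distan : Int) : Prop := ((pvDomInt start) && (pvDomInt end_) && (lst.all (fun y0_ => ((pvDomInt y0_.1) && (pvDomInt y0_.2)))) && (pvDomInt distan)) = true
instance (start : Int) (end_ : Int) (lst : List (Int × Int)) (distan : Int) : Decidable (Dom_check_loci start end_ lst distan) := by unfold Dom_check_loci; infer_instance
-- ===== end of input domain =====

-- B fuses A's two min-over-comprehension reductions into one single pass that keeps a found flag (return value only; no side effects).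


-- ===== PORT A =====
def check_loci (start : Int) (end_ : Int) (lst : List (Int × Int)) (distan : Int) : Bool :=
  let flag := false
  if lst ≠ [] then
    match PySem.List.min? (lst.map (fun loci => |start - loci.1|)) (fun x => x),
          PySem.List.min? (lst.map (fun loci => |end_ - loci.2|)) (fun x => x) with
    | some min_start_distan, some min_end_distan =>
        if min_start_distan ≤ distan ∨ min_end_distan ≤ distan then true else flag
    | _, _ => flag  -- unreachable: the mapped lists are nonempty
  else flag

-- ===== PORT B =====
def check_loci_alt (start : Int) (end_ : Int) (lst : List (Int × Int)) (distan : Int) : Bool :=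
  lst.foldl (fun found loci =>
    let a := loci.1
    let b := loci.2
    if |start - a| ≤ distan ∨ |end_ - b| ≤ distan then true else found) false

-- ===== PRECONDITION & SPEC =====
def Spec_check_loci (start : Int) (end_ : Int) (lst : List (Int × Int)) (distan : Int) (out : Bool) : Prop := out = check_loci_alt start end_ lst distan
instance (start : Int) (end_ : Int) (lst : List (Int × Int)) (distan : Int) (out : Bool) : Decidable (Spec_check_loci start end_ lst distan out) := by unfold Spec_check_loci; infer_instance

-- ===== CLAIM (what is proved, stated in full; the proofs are below) =====
def Claim_equal_check_loci : Prop := ∀ (start : Int) (end_ : Int) (lst : List (Int × Int)) (distan : Int), Dom_check_loci start end_ lst distan → Spec_check_loci start end_ lst distan (check_loci start end_ lst distan)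

-- ===== LEMMAS AND PROOFS =====

-- B's flag loop is 'any' of the combined predicate
theorem foldl_flag_eq_any (start end_ distan : Int) (xs : List (Int × Int)) (b : Bool) :
    xs.foldl (fun found loci =>
      let a := loci.1
      let b2 := loci.2
      if |start - a| ≤ distan ∨ |end_ - b2| ≤ distan then true else found) b
    = (b || xs.any (fun loci => decide (|start - loci.1| ≤ distan ∨ |end_ - loci.2| ≤ distan))) := by
  induction xs generalizing b with
  | nil => simp
  | cons x t ih =>
      simp only [List.foldl_cons, List.any_cons, ih]
      by_cases h : |start - x.1| ≤ distan ∨ |end_ - x.2| ≤ distan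
      · simp [h]
      · simp [h]

-- min over a nonempty mapped list is ≤ d iff some element's image is ≤ d
theorem min_map_le_iff {α : Type} (f : α → Int) (xs : List α) (d : Int) (m : Int)
    (h : PySem.List.min? (xs.map f) (fun x => x) = some m) :
    (m ≤ d ↔ xs.any (fun x => decide (f x ≤ d)) = true) := by
  constructor
  · intro hm
    have hmem := PySem.List.min?_mem h
    rcases List.mem_map.mp hmem with ⟨x, hx, hfx⟩
    exact List.any_eq_true.mpr ⟨x, hx, by simp [hfx ▸ hm]⟩
  · intro ha
    rcases List.any_eq_true.mp ha with ⟨x, hx, hfx⟩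
    have := PySem.List.min?_isMin h (f x) (List.mem_map.mpr ⟨x, hx, rfl⟩)
    simp at hfx
    omega

-- ===== VERDICT (by name: the statement is the Claim_ definition above) =====
theorem check_loci_spec : Claim_equal_check_loci := by
  intro start end_ lst distan _
  unfold Spec_check_loci check_loci check_loci_alt
  rw [foldl_flag_eq_any start end_ distan lst false]
  cases lst with
  | nil => simp
  | cons x t =>
      simp only [ne_eq, reduceCtorEq, not_false_eq_true, if_true, Bool.false_or]
      rcases hs : PySem.List.min? ((x :: t).map (fun loci => |start - loci.1|)) (fun x => x) with _ | ms
      · simp [PySem.List.min?_eq_none_iff] at hs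
      rcases he : PySem.List.min? ((x :: t).map (fun loci => |end_ - loci.2|)) (fun x => x) with _ | me
      · simp [PySem.List.min?_eq_none_iff] at he
      have h1 := min_map_le_iff (fun loci => |start - loci.1|) (x :: t) distan ms hs
      have h2 := min_map_le_iff (fun loci => |end_ - loci.2|) (x :: t) distan me he
      rw [hs, he]
      simp only []
      by_cases hc : ms ≤ distan ∨ me ≤ distan
      · rw [if_pos hc]
        rcases hc with hc | hc
        · rcases List.any_eq_true.mp (h1.mp hc) with ⟨y, hy, hpy⟩
          exact (List.any_eq_true.mpr ⟨y, hy, by simp at hpy ⊢; exact Or.inl hpy⟩).symm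
        · rcases List.any_eq_true.mp (h2.mp hc) with ⟨y, hy, hpy⟩
          exact (List.any_eq_true.mpr ⟨y, hy, by simp at hpy ⊢; exact Or.inr hpy⟩).symm
      · rw [if_neg hc]
        symm
        rw [List.any_eq_false]
        intro y hy
        simp only [decide_eq_true_eq]
        push Not at hc
        intro habs
        rcases habs with h | h
        · exact absurd (h1.mpr (List.any_eq_true.mpr ⟨y, hy, by simpa⟩)) (by omega)
        · exact absurd (h2.mpr (List.any_eq_true.mpr ⟨y, hy, by simpa⟩)) (by omega)
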